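-- pv_equiv track=rewrite | github.com/IgrMd/yandex-algos-training | Тренировки по алгоритмам 7.0/Лекция 0. Разминка/E.py | average_level
-- ===== SOURCE A (Python) =====
-- def average_level(n, ratings):
--     prefix_sum = [0] * n
--     prefix_sum[0] = ratings[0]
--     for i in range(1, n):
--         prefix_sum[i] = prefix_sum[i - 1] + ratings[i]
--     discontent_levels = [0] * n
--     for i in range(n):
--         discontent_levels[i] = abs(prefix_sum[i] - (i + 1) * ratings[i]) + abs(
--             ratings[i] * (n - i - 1) - (prefix_sum[-1] - prefix_sum[i]))
--     return discontent_levels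
-- ===== SOURCE B (Python) =====
-- def average_level(n, ratings):
--     discontent = [0] * n
--     # resident 0 has nobody in front of him: only the queue behind him matters
--     discontent[0] = abs(sum(ratings[j] - ratings[0] for j in range(n)))
--     for i in range(1, n):
--         ri = ratings[i]
--         left = 0
--         for j in range(i + 1):
--             left += ratings[j] - ri
--         right = 0
--         for j in range(i + 1, n):
--             right += ratings[j] - ri
--         discontent[i] = abs(left) + abs(right)
--     return discontent
-- ===== Notes on version B (the rewrite author's own statement) =====
-- stated objective: alternative
-- what changed: Drops A's prefix-sum table entirely: B computes each discontent value by directly scanning ratings (left part j<=i, right part i<j<n) for every index, with resident 0 (empty left part) filled first, an O(n^2) repeated-scan strategy instead of A's build-table-then-single-pass.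
import Mathlib
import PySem

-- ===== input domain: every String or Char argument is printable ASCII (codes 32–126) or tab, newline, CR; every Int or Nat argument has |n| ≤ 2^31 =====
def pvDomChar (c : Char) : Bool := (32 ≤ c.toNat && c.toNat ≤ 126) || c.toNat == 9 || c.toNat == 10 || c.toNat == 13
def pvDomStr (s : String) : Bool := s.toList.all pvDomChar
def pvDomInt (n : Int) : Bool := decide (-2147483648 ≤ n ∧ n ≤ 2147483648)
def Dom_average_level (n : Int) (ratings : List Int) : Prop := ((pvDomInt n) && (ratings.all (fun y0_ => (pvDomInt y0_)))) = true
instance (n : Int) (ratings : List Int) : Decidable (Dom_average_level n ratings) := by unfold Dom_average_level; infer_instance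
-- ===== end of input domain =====

-- B drops A's prefix-sum table and computes each discontent value by direct repeated scans over ratings (alternative decomposition, same values).

-- ===== PORT A =====
-- literal port of A: build prefix_sum by in-place assignment over range(1,n), then fill discontent_levels over range(n)
def average_level (n : Int) (ratings : List Int) : List Int :=
  let prefix0 : List Int := List.replicate n.toNat 0
  let prefix1 := PySem.List.pySetD prefix0 0 (PySem.List.pyGetD ratings 0 0)
  let prefix_sum := (PySem.List.pyRange 1 n 1).foldl
    (fun ps i => PySem.List.pySetD ps i
      (PySem.List.pyGetD ps (i - 1) 0 + PySem.List.pyGetD ratings i 0)) prefix1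
  let discontent0 : List Int := List.replicate n.toNat 0
  (PySem.List.pyRange 0 n 1).foldl
    (fun d i => PySem.List.pySetD d i
      (|PySem.List.pyGetD prefix_sum i 0 - (i + 1) * PySem.List.pyGetD ratings i 0| +
       |PySem.List.pyGetD ratings i 0 * (n - i - 1) -
         (PySem.List.pyGetD prefix_sum (-1) 0 - PySem.List.pyGetD prefix_sum i 0)|))
    discontent0

-- ===== PORT B =====
-- literal port of B: preallocate [0]*n, fill resident 0 (empty left part), then direct left/right scans per index
def average_level_alt (n : Int) (ratings : List Int) : List Int :=
  let discontent0 : List Int := List.replicate n.toNat 0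
  let first := |((PySem.List.pyRange 0 n 1).map
      (fun j => PySem.List.pyGetD ratings j 0 - PySem.List.pyGetD ratings 0 0)).sum|
  let discontent1 := PySem.List.pySetD discontent0 0 first
  (PySem.List.pyRange 1 n 1).foldl (fun d i =>
    let ri := PySem.List.pyGetD ratings i 0
    let left := (PySem.List.pyRange 0 (i + 1) 1).foldl
      (fun s j => s + (PySem.List.pyGetD ratings j 0 - ri)) 0
    let right := (PySem.List.pyRange (i + 1) n 1).foldl
      (fun s j => s + (PySem.List.pyGetD ratings j 0 - ri)) 0
    PySem.List.pySetD d i (|left| + |right|)) discontent1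

-- ===== PRECONDITION & SPEC =====
-- Pre_ excludes exactly the inputs where both A and B raise IndexError: n ≤ 0 or n > len(ratings).
def Pre_average_level (n : Int) (ratings : List Int) : Prop := 1 ≤ n ∧ n ≤ ratings.length
instance (n : Int) (ratings : List Int) : Decidable (Pre_average_level n ratings) := by unfold Pre_average_level; infer_instance
def pvWitness_average_level : Int × List Int := (3, [1, 5, 2])

def Spec_average_level (n : Int) (ratings : List Int) (out : List Int) : Prop := out = average_level_alt n ratings
instance (n : Int) (ratings : List Int) (out : List Int) : Decidable (Spec_average_level n ratings out) := by unfold Spec_average_level; infer_instance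

-- ===== CLAIM (what is proved, stated in full; the proofs are below) =====
def Claim_equal_average_level : Prop := ∀ (n : Int) (ratings : List Int), Dom_average_level n ratings → Pre_average_level n ratings → Spec_average_level n ratings (average_level n ratings)

-- ===== LEMMAS AND PROOFS =====

-- pvS xs j = sum of the first j+1 elements (the value prefix_sum[j] holds in A)
def pvS (xs : List Int) (j : Nat) : Int := (xs.take (j + 1)).sum

theorem pvS_succ (xs : List Int) (j : Nat) (h : j + 1 < xs.length) :
    pvS xs (j + 1) = pvS xs j + xs.getD (j + 1) 0 := by
  unfold pvS
  rw [show j + 1 + 1 = (j+1) + 1 from rfl, List.take_add_one,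
      List.getElem?_eq_getElem h, List.getD_eq_getElem?_getD,
      List.getElem?_eq_getElem h]
  simp only [Option.toList_some, List.sum_append, List.sum_cons, List.sum_nil, Option.getD_some]
  ring

theorem map_pyGetD_take (xs : List Int) (m : Nat) (h : m ≤ xs.length) :
    (PySem.List.pyRange 0 (m : Int) 1).map (fun t => PySem.List.pyGetD xs t 0) = xs.take m := by
  rw [PySem.List.pyRange_one]
  apply List.ext_getElem
  · simp; omega
  · intro i hi hi2
    simp only [List.getElem_map, List.getElem_range, List.getElem_take, zero_add,
      PySem.List.pyGetD_natCast]
    rw [List.getD_eq_getElem?_getD, List.getElem?_eq_getElem (by simp at hi ⊢; omega)]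
    simp

theorem sum_map_sub_const (l : List Int) (g : Int → Int) (c : Int) :
    (l.map (fun t => g t - c)).sum = (l.map g).sum - l.length * c := by
  induction l with
  | nil => simp
  | cons a t ih => simp [ih]; ring

theorem pyGetD_map_range (f : Nat → Int) (N j : Nat) (h : j < N) :
    PySem.List.pyGetD ((List.range N).map f) (j : Int) 0 = f j := by
  rw [PySem.List.pyGetD_natCast, List.getD_eq_getElem?_getD, List.getElem?_map,
    List.getElem?_range h]
  simp

theorem pyGetD_map_range_last (f : Nat → Int) (N : Nat) (h : 1 ≤ N) :
    PySem.List.pyGetD ((List.range N).map f) (-1) 0 = f (N - 1) := by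
  have hne : (List.range N).map f ≠ [] := by simp; omega
  rw [PySem.List.pyGetD_neg_one _ _ hne, List.getLast_eq_getElem]
  simp

-- filling a fresh [0]*N by d[i] = g(i) over range(k), k ≤ N, is a map
theorem setloop_aux (g : Int → Int) (N k : Nat) (hk : k ≤ N) :
    (PySem.List.pyRange 0 (k : Int) 1).foldl
      (fun d i => PySem.List.pySetD d i (g i)) (List.replicate N (0:Int))
    = (List.range N).map (fun j => if j < k then g (j : Int) else 0) := by
  induction k with
  | zero =>
    rw [PySem.List.pyRange_one_eq_nil (by omega)]
    apply List.ext_getElem <;> simp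
  | succ k ih =>
    rw [show ((k+1:Nat):Int) = (k:Int)+1 by push_cast; ring,
        PySem.List.pyRange_one_succ_right (by omega), List.foldl_append, ih (by omega)]
    simp only [List.foldl_cons, List.foldl_nil, PySem.List.pySetD_natCast]
    apply List.ext_getElem <;> simp
    intro i hi
    rw [List.getElem_set]
    by_cases h : k = i <;> simp [h] <;> omega

-- A's first loop: prefix_sum after processing range(1,k) holds pvS at indices < k
theorem prefix_aux (ratings : List Int) (N : Nat) (hN : N ≤ ratings.length)
    (k : Nat) (hk1 : 1 ≤ k) (hk2 : k ≤ N) :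
    (PySem.List.pyRange 1 (k : Int) 1).foldl
      (fun ps i => PySem.List.pySetD ps i
        (PySem.List.pyGetD ps (i - 1) 0 + PySem.List.pyGetD ratings i 0))
      (PySem.List.pySetD (List.replicate N 0) 0 (PySem.List.pyGetD ratings 0 0))
    = (List.range N).map (fun j => if j < k then pvS ratings j else 0) := by
  induction k with
  | zero => omega
  | succ k ih =>
    by_cases hk : k = 0
    · subst hk
      rw [show ((1:Nat):Int) = 1 by norm_num, PySem.List.pyRange_one_eq_nil (by omega)]
      rw [PySem.List.pySetD_of_nonneg (i := 0) _ _ (by omega), PySem.List.pyGetD_zero]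
      apply List.ext_getElem
      · simp
      · intro i hi _
        simp only [List.foldl_nil, List.getElem_set, List.getElem_map, List.getElem_range,
          List.getElem_replicate, Int.toNat_zero]
        by_cases h : i = 0
        · subst h
          have hlen : 0 < ratings.length := by omega
          simp only [if_pos (by omega : (0:Nat) < 0 + 1), pvS]
          rw [List.take_one]
          cases ratings with
          | nil => simp at hlen
          | cons a t => simp
        · rw [if_neg (by omega), if_neg (by omega)]
    · have hk1' : 1 ≤ k := by omega
      rw [show ((k+1:Nat):Int) = (k:Int)+1 by push_cast; ring,
          PySem.List.pyRange_one_succ_right (by omega), List.foldl_append,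
          ih hk1' (by omega)]
      simp only [List.foldl_cons, List.foldl_nil]
      have hgd : PySem.List.pyGetD ((List.range N).map (fun j => if j < k then pvS ratings j else 0)) ((k:Int) - 1) 0
          = pvS ratings (k-1) := by
        rw [show (k:Int) - 1 = ((k-1:Nat):Int) by omega, PySem.List.pyGetD_natCast]
        rw [List.getD_eq_getElem?_getD, List.getElem?_map, List.getElem?_range (by omega : k-1 < N)]
        simp only [Option.map_some, Option.getD_some]
        rw [if_pos (by omega)]
      rw [hgd, PySem.List.pyGetD_natCast, PySem.List.pySetD_natCast]
      have hval : pvS ratings (k-1) + ratings.getD k 0 = pvS ratings k := by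
        have := pvS_succ ratings (k-1) (by omega)
        rw [show k - 1 + 1 = k by omega] at this
        omega
      rw [hval]
      apply List.ext_getElem
      · simp
      · intro i hi _
        simp only [List.getElem_set, List.getElem_map, List.getElem_range]
        by_cases h : k = i
        · subst h; rw [if_pos rfl, if_pos (by omega)]
        · rw [if_neg h]
          by_cases h2 : i < k
          · rw [if_pos h2, if_pos (by omega)]
          · rw [if_neg h2, if_neg (by omega)]

theorem A_unfold (n : Int) (ratings : List Int) :
    average_level n ratings =
    (PySem.List.pyRange 0 n 1).foldl
      (fun d i => PySem.List.pySetD d i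
        (|PySem.List.pyGetD ((PySem.List.pyRange 1 n 1).foldl
            (fun ps i => PySem.List.pySetD ps i
              (PySem.List.pyGetD ps (i - 1) 0 + PySem.List.pyGetD ratings i 0))
            (PySem.List.pySetD (List.replicate n.toNat 0) 0 (PySem.List.pyGetD ratings 0 0))) i 0
          - (i + 1) * PySem.List.pyGetD ratings i 0| +
         |PySem.List.pyGetD ratings i 0 * (n - i - 1) -
           (PySem.List.pyGetD ((PySem.List.pyRange 1 n 1).foldl
            (fun ps i => PySem.List.pySetD ps i
              (PySem.List.pyGetD ps (i - 1) 0 + PySem.List.pyGetD ratings i 0))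
            (PySem.List.pySetD (List.replicate n.toNat 0) 0 (PySem.List.pyGetD ratings 0 0))) (-1) 0
            - PySem.List.pyGetD ((PySem.List.pyRange 1 n 1).foldl
            (fun ps i => PySem.List.pySetD ps i
              (PySem.List.pyGetD ps (i - 1) 0 + PySem.List.pyGetD ratings i 0))
            (PySem.List.pySetD (List.replicate n.toNat 0) 0 (PySem.List.pyGetD ratings 0 0))) i 0)|))
      (List.replicate n.toNat 0) := rfl

-- the common "direct scan" form both programs are reduced to
def pvScan (n : Int) (ratings : List Int) : List Int :=
  (PySem.List.pyRange 0 n 1).map (fun i =>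
    |(PySem.List.pyRange 0 (i + 1) 1).foldl
      (fun s j => s + (PySem.List.pyGetD ratings j 0 - PySem.List.pyGetD ratings i 0)) 0| +
    |(PySem.List.pyRange (i + 1) n 1).foldl
      (fun s j => s + (PySem.List.pyGetD ratings j 0 - PySem.List.pyGetD ratings i 0)) 0|)

theorem A_eq_scan (n : Int) (ratings : List Int) (h1 : 1 ≤ n) (h2 : n ≤ ratings.length) :
    average_level n ratings = pvScan n ratings := by
  obtain ⟨N, rfl⟩ : ∃ N : Nat, n = (N : Int) := ⟨n.toNat, by omega⟩
  have hN1 : 1 ≤ N := by omega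
  have hN2 : N ≤ ratings.length := by omega
  rw [A_unfold]
  unfold pvScan
  rw [show ((N:Int)).toNat = N by omega]
  rw [prefix_aux ratings N hN2 N hN1 le_rfl]
  rw [show ((List.range N).map (fun j => if j < N then pvS ratings j else 0))
        = (List.range N).map (fun j => pvS ratings j) from
      List.map_congr_left (fun j hj => by rw [if_pos (List.mem_range.mp hj)])]
  rw [setloop_aux _ N N le_rfl]
  rw [show ((List.range N).map (fun j => if j < N then _ else (0:Int)))
        = _ from
      List.map_congr_left (fun j hj => by rw [if_pos (List.mem_range.mp hj)])]
  rw [PySem.List.pyRange_one 0 (N:Int)]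
  rw [show ((N:Int) - 0).toNat = N by omega, List.map_map]
  apply List.map_congr_left
  intro j hj
  have hjN : j < N := List.mem_range.mp hj
  simp only [Function.comp, zero_add]
  rw [pyGetD_map_range _ _ _ hjN, pyGetD_map_range_last _ _ hN1]
  rw [PySem.List.foldl_add, PySem.List.foldl_add]
  rw [show ((j:Int) + 1) = ((j+1 : Nat) : Int) by push_cast; ring]
  rw [sum_map_sub_const, sum_map_sub_const]
  rw [map_pyGetD_take ratings (j+1) (by omega)]
  have hs := congrArg (fun l => (l.map (fun t => PySem.List.pyGetD ratings t 0)).sum)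
    (PySem.List.pyRange_one_append 0 ((j+1:Nat):Int) (N:Int) (by omega) (by omega))
  simp only [List.map_append, List.sum_append] at hs
  rw [map_pyGetD_take ratings (j+1) (by omega), map_pyGetD_take ratings N hN2] at hs
  have hsum : ((PySem.List.pyRange ((j+1:Nat):Int) (N:Int) 1).map (fun t => PySem.List.pyGetD ratings t 0)).sum
      = (ratings.take N).sum - (ratings.take (j+1)).sum := by omega
  rw [hsum, PySem.List.length_pyRange_one, PySem.List.length_pyRange_one]
  unfold pvS
  rw [show N - 1 + 1 = N by omega]
  rw [show ((((j+1:Nat):Int) - 0).toNat : Int) = (j:Int) + 1 by omega]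
  rw [show ((((N:Nat):Int) - ((j+1:Nat):Int)).toNat : Int) = (N:Int) - (j:Int) - 1 by omega]
  congr 1
  · congr 1; push_cast; ring
  · rw [abs_sub_comm]; congr 1; ring

-- B's fill loop (value independent of the accumulator list) over range(1,k), after discontent[0] = v, is a map
theorem setloop1_aux (g : Int → Int) (v : Int) (N k : Nat) (hk1 : 1 ≤ k) (hk2 : k ≤ N) :
    (PySem.List.pyRange 1 (k : Int) 1).foldl
      (fun d i => PySem.List.pySetD d i (g i))
      (PySem.List.pySetD (List.replicate N (0:Int)) 0 v)
    = (List.range N).map (fun j => if j = 0 then v else if j < k then g (j:Int) else 0) := by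
  induction k with
  | zero => omega
  | succ k ih =>
    by_cases hk : k = 0
    · subst hk
      rw [show ((1:Nat):Int) = 1 by norm_num, PySem.List.pyRange_one_eq_nil (by omega)]
      rw [PySem.List.pySetD_of_nonneg (i := 0) _ _ (by omega)]
      apply List.ext_getElem
      · simp
      · intro i hi _
        simp only [List.foldl_nil, List.getElem_set, List.getElem_map, List.getElem_range,
          List.getElem_replicate, Int.toNat_zero]
        by_cases h : i = 0
        · subst h; simp
        · simp [h]; omega
    · have hk1' : 1 ≤ k := by omega
      rw [show ((k+1:Nat):Int) = (k:Int)+1 by push_cast; ring,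
          PySem.List.pyRange_one_succ_right (by omega), List.foldl_append,
          ih hk1' (by omega)]
      simp only [List.foldl_cons, List.foldl_nil, PySem.List.pySetD_natCast]
      apply List.ext_getElem
      · simp
      · intro i hi _
        simp only [List.getElem_set, List.getElem_map, List.getElem_range]
        by_cases h : k = i
        · subst h; rw [if_pos rfl, if_neg (by omega), if_pos (by omega)]
        · rw [if_neg h]
          by_cases h0 : i = 0
          · rw [if_pos h0, if_pos h0]
          · rw [if_neg h0, if_neg h0]
            by_cases h2 : i < k
            · rw [if_pos h2, if_pos (by omega)]
            · rw [if_neg h2, if_neg (by omega)]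

theorem B_unfold (n : Int) (ratings : List Int) :
    average_level_alt n ratings =
    (PySem.List.pyRange 1 n 1).foldl
      (fun d i => PySem.List.pySetD d i
        (|(PySem.List.pyRange 0 (i + 1) 1).foldl
            (fun s j => s + (PySem.List.pyGetD ratings j 0 - PySem.List.pyGetD ratings i 0)) 0| +
         |(PySem.List.pyRange (i + 1) n 1).foldl
            (fun s j => s + (PySem.List.pyGetD ratings j 0 - PySem.List.pyGetD ratings i 0)) 0|))
      (PySem.List.pySetD (List.replicate n.toNat 0) 0
        |((PySem.List.pyRange 0 n 1).map
            (fun j => PySem.List.pyGetD ratings j 0 - PySem.List.pyGetD ratings 0 0)).sum|) := rfl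

theorem B_eq_scan (n : Int) (ratings : List Int) (h1 : 1 ≤ n) (h2 : n ≤ ratings.length) :
    average_level_alt n ratings = pvScan n ratings := by
  obtain ⟨N, rfl⟩ : ∃ N : Nat, n = (N : Int) := ⟨n.toNat, by omega⟩
  have hN1 : 1 ≤ N := by omega
  rw [B_unfold, show ((N:Int)).toNat = N by omega]
  rw [setloop1_aux _ _ N N hN1 le_rfl]
  unfold pvScan
  conv_rhs => rw [PySem.List.pyRange_one 0 (N:Int)]
  rw [show ((N:Int) - 0).toNat = N by omega]
  conv_rhs => rw [List.map_map]
  apply List.map_congr_left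
  intro j hj
  have hjN : j < N := List.mem_range.mp hj
  simp only [Function.comp, zero_add]
  by_cases h0 : j = 0
  · subst h0
    rw [if_pos rfl]
    have hleft : (PySem.List.pyRange 0 ((0:Int) + 1) 1).foldl
        (fun s t => s + (PySem.List.pyGetD ratings t 0 - PySem.List.pyGetD ratings 0 0)) 0 = 0 := by
      rw [PySem.List.pyRange_one_singleton]
      simp
    have hcons := PySem.List.pyRange_one_cons (a := 0) (b := (N:Int)) (by omega)
    rw [show ((0:Nat):Int) = 0 by norm_num, hleft, abs_zero, zero_add]
    rw [hcons, List.map_cons, List.sum_cons, PySem.List.foldl_add, zero_add, sub_self, zero_add]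
  · rw [if_neg (by exact_mod_cast h0), if_pos hjN]

-- ===== VERDICT (by name: the statement is the Claim_ definition above) =====
theorem average_level_spec : Claim_equal_average_level := by
  intro n ratings _ hpre
  obtain ⟨h1, h2⟩ := hpre
  unfold Spec_average_level
  rw [A_eq_scan n ratings h1 h2, B_eq_scan n ratings h1 h2]
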